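-- pv_equiv track=rewrite | github.com/sda-dasa/Comb_Analisys | 7.3.py | permutate_3
-- ===== SOURCE A (Python) =====
-- def permutate_3 (alph):
--     result = []
--     temp = ''
--     for item in alph:
--         temp = item
--         for i in alph:
--             temp+=i
--             for j in alph:
--                 temp = item + i + j
--                 result.append(temp)
--     return result
-- ===== SOURCE B (Python) =====
-- def permutate_3(alph):
--     acc = ['']
--     for _ in range(3):
--         acc = [s + c for s in acc for c in alph]
--     return acc
-- ===== Notes on version B (the rewrite author's own statement) =====
-- stated objective: simpler
-- what changed: Replaces the three hardcoded nested loops and the threaded temp variable with an incremental prefix-extension loop: acc starts as the singleton empty-string list and is extended by one alphabet element three times.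
import Mathlib
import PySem

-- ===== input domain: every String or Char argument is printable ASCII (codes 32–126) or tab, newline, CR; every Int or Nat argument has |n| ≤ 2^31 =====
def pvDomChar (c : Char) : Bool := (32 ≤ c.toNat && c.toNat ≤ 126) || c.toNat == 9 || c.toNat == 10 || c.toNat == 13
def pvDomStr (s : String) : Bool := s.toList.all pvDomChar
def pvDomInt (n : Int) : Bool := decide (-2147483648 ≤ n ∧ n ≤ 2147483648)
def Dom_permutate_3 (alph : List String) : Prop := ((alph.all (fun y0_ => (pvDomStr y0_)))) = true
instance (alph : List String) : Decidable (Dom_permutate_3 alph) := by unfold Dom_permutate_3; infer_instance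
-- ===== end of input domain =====

-- B replaces A's three hardcoded nested loops by an incremental prefix-extension loop (simpler decomposition; same cost).

-- ===== PORT A =====
-- state = (result, temp), threaded exactly as in the Python
def permutate_3 (alph : List String) : List String :=
  (alph.foldl (fun st item =>
    let st := (st.1, item)
    alph.foldl (fun st i =>
      let st := (st.1, st.2 ++ i)
      alph.foldl (fun st j =>
        let temp := item ++ i ++ j
        (st.1 ++ [temp], temp)) st) st) (([] : List String), "")).1

-- ===== PORT B =====
def permutate_3_alt (alph : List String) : List String :=
  (List.range 3).foldl (fun acc _ => acc.flatMap (fun s => alph.map (fun c => s ++ c))) [""]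

-- ===== PRECONDITION & SPEC =====
def Spec_permutate_3 (alph : List String) (out : List String) : Prop := out = permutate_3_alt alph
instance (alph : List String) (out : List String) : Decidable (Spec_permutate_3 alph out) := by unfold Spec_permutate_3; infer_instance

-- ===== CLAIM (what is proved, stated in full; the proofs are below) =====
def Claim_equal_permutate_3 : Prop := ∀ (alph : List String), Dom_permutate_3 alph → Spec_permutate_3 alph (permutate_3 alph)

-- ===== LEMMAS AND PROOFS =====

-- innermost loop of A
theorem inner_loop (alph : List String) (f : String → String) (st : List String × String) :
    (alph.foldl (fun st j => (st.1 ++ [f j], f j)) st).1 = st.1 ++ alph.map f := by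
  induction alph generalizing st with
  | nil => simp
  | cons a l ih => simp [List.foldl, ih]

-- middle loop of A
theorem mid_loop (alph l : List String) (item : String) (st : List String × String) :
    (l.foldl (fun st i =>
        alph.foldl (fun st j => (st.1 ++ [item ++ i ++ j], item ++ i ++ j)) (st.1, st.2 ++ i)) st).1
      = st.1 ++ l.flatMap (fun i => alph.map (fun j => item ++ i ++ j)) := by
  induction l generalizing st with
  | nil => simp
  | cons a l ih => simp [List.foldl, ih, inner_loop]

-- outer loop of A
theorem outer_loop (alph l : List String) (st : List String × String) :
    (l.foldl (fun st item =>
        alph.foldl (fun st i =>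
          alph.foldl (fun st j => (st.1 ++ [item ++ i ++ j], item ++ i ++ j)) (st.1, st.2 ++ i)) (st.1, item)) st).1
      = st.1 ++ l.flatMap (fun item => alph.flatMap (fun i => alph.map (fun j => item ++ i ++ j))) := by
  induction l generalizing st with
  | nil => simp
  | cons a l ih => simp [List.foldl, ih, mid_loop]

theorem permutate_3_eq (alph : List String) :
    permutate_3 alph = alph.flatMap (fun item => alph.flatMap (fun i => alph.map (fun j => item ++ i ++ j))) := by
  simpa [permutate_3] using outer_loop alph alph (([] : List String), "")

theorem permutate_3_alt_eq (alph : List String) :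
    permutate_3_alt alph = alph.flatMap (fun item => alph.flatMap (fun i => alph.map (fun j => item ++ i ++ j))) := by
  simp [permutate_3_alt, List.range_succ, List.flatMap_map, List.flatMap_assoc]

-- ===== VERDICT (by name: the statement is the Claim_ definition above) =====
theorem permutate_3_spec : Claim_equal_permutate_3 := by
  intro alph _
  unfold Spec_permutate_3
  rw [permutate_3_eq, permutate_3_alt_eq]
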